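-- pv_equiv track=rewrite | github.com/sanit0x79/UniProjects | pythonProjects/periodicSystem.py | is_periodical
-- ===== SOURCE A (Python) =====
-- def is_periodical(s, E):
--
--     #This function takes a string and sees if the word can be created using only symbols from the periodic table
--     #Parameters: s = string input like "tree", E = list with the symbols from periodic system
--    if s == "":
--       return True
--
--    for element in E:
--       if s[:len(element)] == element:
--          if is_periodical(s[len(element):], E):
--             return True
--
--    return False
-- ===== SOURCE B (Python) =====
-- def is_periodical(s, E):
--     # Bottom-up DP over suffix positions: dp[i] == "s[i:] is segmentable into symbols from E".
--     n = len(s)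
--     dp = [False] * (n + 1)
--     dp[n] = True
--     for i in range(n - 1, -1, -1):
--         dp[i] = any(e and s[i:i + len(e)] == e and dp[i + len(e)] for e in E)
--     return dp[0]
-- ===== Notes on version B (the rewrite author's own statement) =====
-- stated objective: alternative
-- what changed: Replaced the top-down recursion over suffixes with a bottom-up DP table dp[i] = 's[i:] is segmentable', filled right-to-left in one pass.
-- outside the precondition, e.g. on is_periodical('h', ['h', '']): A returns True, B returns True
import Mathlib
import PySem

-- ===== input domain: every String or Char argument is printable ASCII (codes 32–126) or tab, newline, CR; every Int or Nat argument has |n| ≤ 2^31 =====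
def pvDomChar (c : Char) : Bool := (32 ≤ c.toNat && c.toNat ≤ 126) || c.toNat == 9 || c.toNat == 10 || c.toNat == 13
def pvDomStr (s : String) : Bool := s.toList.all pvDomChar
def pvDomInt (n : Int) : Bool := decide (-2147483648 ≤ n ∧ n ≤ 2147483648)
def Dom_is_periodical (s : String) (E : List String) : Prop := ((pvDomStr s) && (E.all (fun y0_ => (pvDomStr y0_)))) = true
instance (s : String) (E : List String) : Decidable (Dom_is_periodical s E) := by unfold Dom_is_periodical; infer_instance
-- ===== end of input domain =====

-- B replaces A's top-down recursion over suffixes by a bottom-up DP table over suffix positions (objective: alternative).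

-- ===== PORT A =====
-- A's recursion: try each element as a prefix (s[:len(e)] == e, an exact nonnegative slice = List.take),
-- recurse on the rest (List.drop). Fuel only makes the recursion total in Lean; with "" ∉ E every
-- recursive call strictly shortens s, so fuel = |s|+1 never runs out inside Pre_.
def pvIsPerA : Nat → List Char → List (List Char) → Bool
  | 0, _, _ => false
  | (fuel+1), s, E =>
    if s = [] then true
    else E.any (fun e => (s.take e.length == e) && pvIsPerA fuel (s.drop e.length) E)

def is_periodical (s : String) (E : List String) : Bool :=
  pvIsPerA (s.toList.length + 1) s.toList (E.map String.toList)

-- ===== PORT B =====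
-- dp for positions i..n stored back-to-front as a list: (pvDpB suffix E) = [dp i, dp (i+1), …, dp n];
-- Python's dp[i+len(e)] is d.getD (e.length-1) in this representation.
def pvDpB : List Char → List (List Char) → List Bool
  | [], _ => [true]
  | (c :: rest), E =>
    let d := pvDpB rest E
    (E.any (fun e => (!(e == [])) && ((c :: rest).take e.length == e) && d.getD (e.length - 1) false)) :: d

def is_periodical_alt (s : String) (E : List String) : Bool :=
  (pvDpB s.toList (E.map String.toList)).headD false

-- ===== PRECONDITION & SPEC =====
-- Pre_ excludes E containing the empty string together with a nonempty s: there A's zero-progress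
-- recursion raises RecursionError unless an earlier element succeeds first (e.g. on ("h", ["h", ""])
-- A still returns True, as does B).
def Pre_is_periodical (s : String) (E : List String) : Prop := s = "" ∨ "" ∉ E
instance (s : String) (E : List String) : Decidable (Pre_is_periodical s E) := by unfold Pre_is_periodical; infer_instance
def pvWitness_is_periodical : String × List String := ("hehe", ["h", "e", "he"])

def Spec_is_periodical (s : String) (E : List String) (out : Bool) : Prop := out = is_periodical_alt s E
instance (s : String) (E : List String) (out : Bool) : Decidable (Spec_is_periodical s E out) := by unfold Spec_is_periodical; infer_instance

-- ===== CLAIM (what is proved, stated in full; the proofs are below) =====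
def Claim_equal_is_periodical : Prop := ∀ (s : String) (E : List String), Dom_is_periodical s E → Pre_is_periodical s E → Spec_is_periodical s E (is_periodical s E)

-- ===== LEMMAS AND PROOFS =====

theorem pv_any_congr_mem {α : Type} (l : List α) (f g : α → Bool)
    (h : ∀ a ∈ l, f a = g a) : l.any f = l.any g := by
  induction l with
  | nil => rfl
  | cons a t ih =>
    simp only [List.any_cons, h a (by simp), ih (fun x hx => h x (by simp [hx]))]

theorem pvDpB_getD (E : List (List Char)) :
    ∀ (s : List Char) (k : Nat), k ≤ s.length →
      (pvDpB s E).getD k false = (pvDpB (s.drop k) E).headD false := by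
  intro s
  induction s with
  | nil =>
    intro k hk
    have : k = 0 := Nat.le_zero.mp hk
    subst this
    rfl
  | cons c rest ih =>
    intro k hk
    cases k with
    | zero => simp [pvDpB, List.getD, List.headD]
    | succ k =>
      have hk' : k ≤ rest.length := by simpa using hk
      simpa [pvDpB, List.getD_cons_succ] using ih k hk'

theorem pvIsPerA_eq_dpB (E : List (List Char)) (hE : [] ∉ E) :
    ∀ (fuel : Nat) (s : List Char), s.length < fuel →
      pvIsPerA fuel s E = (pvDpB s E).headD false := by
  intro fuel
  induction fuel with
  | zero => intro s h; omega
  | succ fuel ih =>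
    intro s hs
    cases s with
    | nil => simp [pvIsPerA, pvDpB]
    | cons c rest =>
      simp only [pvIsPerA, pvDpB, if_neg (by simp : ¬(c :: rest = []))]
      simp only [List.headD_cons]
      apply pv_any_congr_mem
      intro e he
      have hne : e ≠ [] := fun h => hE (h ▸ he)
      have hdec : (!(e == [])) = true := by simp [hne]
      rw [hdec, Bool.true_and]
      by_cases hm : ((c :: rest).take e.length == e) = true
      · rw [hm, Bool.true_and, Bool.true_and]
        -- a successful match forces e.length ≤ |c::rest|
        have hlen : e.length ≤ rest.length + 1 := by
          have := beq_iff_eq.mp hm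
          have h1 : ((c :: rest).take e.length).length = e.length := by rw [this]
          simp only [List.length_take, List.length_cons] at h1
          omega
        obtain ⟨x, e', rfl⟩ : ∃ x e', e = x :: e' := by
          cases e with
          | nil => exact absurd rfl hne
          | cons x e' => exact ⟨x, e', rfl⟩
        have hk : e'.length ≤ rest.length := by simpa using hlen
        have hdrop : (c :: rest).drop (x :: e').length = rest.drop e'.length := by
          simp [List.length_cons]
        rw [hdrop]
        have hfd : (rest.drop e'.length).length < fuel := by
          simp only [List.length_drop]
          simp only [List.length_cons] at hs
          omega
        rw [ih _ hfd]
        have := pvDpB_getD E rest e'.length hk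
        simp only [List.length_cons, Nat.add_sub_cancel]
        exact this.symm
      · rw [Bool.eq_false_iff.mpr hm]
        simp

theorem toList_map_ne_nil (E : List String) (h : "" ∉ E) : [] ∉ E.map String.toList := by
  intro hmem
  obtain ⟨x, hx, hx2⟩ := List.mem_map.mp hmem
  exact h (String.toList_eq_nil_iff.mp hx2 ▸ hx)

-- ===== VERDICT (by name: the statement is the Claim_ definition above) =====
theorem is_periodical_spec : Claim_equal_is_periodical := by
  intro s E _ hpre
  unfold Spec_is_periodical is_periodical is_periodical_alt
  rcases hpre with h | h
  · subst h
    rfl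
  · exact pvIsPerA_eq_dpB (E.map String.toList) (toList_map_ne_nil E h)
      (s.toList.length + 1) s.toList (by omega)
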